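-- pv_equiv track=rewrite | github.com/TioLaba/CoisasQueAndoEstudando | teste2_ordenacao_por_frequencia.py | ordenar_string
-- ===== SOURCE A (Python) =====
-- def ordenar_string(lista_string):
--     def ordenar_frequencia(palavra):
--         frequencia = {}
--         for letra in palavra:
--             if letra in frequencia:
--                 frequencia[letra] += 1
--             else:
--                 frequencia[letra] = 1
--
--         return max(frequencia.values())
--
--     ordenar_lista = sorted(lista_string, key=lambda palavra: (-ordenar_frequencia(palavra), palavra))
--     return ordenar_lista
-- ===== SOURCE B (Python) =====
-- def ordenar_string(lista_string):
--     def ordenar_frequencia(palavra):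
--         # max count over the distinct characters; no frequency table is built
--         return max(palavra.count(letra) for letra in set(palavra))
--
--     # bucket the words by their max character frequency, then emit the buckets
--     # from the highest frequency down, each bucket sorted lexicographically
--     grupos = {}
--     for palavra in lista_string:
--         grupos.setdefault(ordenar_frequencia(palavra), []).append(palavra)
--
--     resultado = []
--     for f in sorted(grupos, reverse=True):
--         resultado.extend(sorted(grupos[f]))
--     return resultado
-- ===== Notes on version B (the rewrite author's own statement) =====
-- stated objective: alternative
-- what changed: Replaces the single keyed sort with a group-by: words are bucketed in a dict by max character frequency (itself computed as max over .count of the distinct characters instead of a counting dict), then buckets are emitted from highest frequency down, each sorted lexicographically.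
import Mathlib
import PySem

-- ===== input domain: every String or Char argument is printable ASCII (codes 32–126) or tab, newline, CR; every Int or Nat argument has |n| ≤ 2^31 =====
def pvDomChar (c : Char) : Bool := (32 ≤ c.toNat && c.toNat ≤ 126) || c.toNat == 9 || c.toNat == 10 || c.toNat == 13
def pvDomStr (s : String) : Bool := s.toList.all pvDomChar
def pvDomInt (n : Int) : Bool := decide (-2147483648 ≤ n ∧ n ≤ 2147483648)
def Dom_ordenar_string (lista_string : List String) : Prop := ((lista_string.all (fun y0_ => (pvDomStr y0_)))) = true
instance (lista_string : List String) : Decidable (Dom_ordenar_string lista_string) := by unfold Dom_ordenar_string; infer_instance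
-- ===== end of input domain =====

-- B buckets the words in a dict by max character frequency (computed as max over .count of the
-- distinct characters), then emits buckets from the highest frequency down, each sorted
-- lexicographically, instead of A's single keyed sort over a counting-dict frequency (alternative).


-- ===== PORT A =====
-- inner helper: build the frequency dict by the loop, then max(frequencia.values())
def ordenarFrequenciaA (palavra : String) : Int :=
  let frequencia : PySem.Dict Char Int :=
    palavra.toList.foldl
      (fun d letra =>
        if d.contains letra then d.modify letra 0 (· + 1)   -- frequencia[letra] += 1
        else d.insert letra 1)                               -- frequencia[letra] = 1
      PySem.Dict.empty
  (PySem.List.max? frequencia.values (fun v => v)).getD 0    -- max() raises on empty: excluded by Pre_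

def ordenar_string (lista_string : List String) : List String :=
  PySem.List.sorted2 lista_string (fun palavra => -(ordenarFrequenciaA palavra)) (fun palavra => palavra)

-- ===== PORT B =====
-- max(palavra.count(letra) for letra in set(palavra)): no dict, one .count scan per distinct character
def ordenarFrequenciaB (palavra : String) : Int :=
  (PySem.List.max?
      ((PySem.Set.ofList palavra.toList).map (fun ch => (PySem.List.count palavra.toList ch : Int)))
      (fun v => v)).getD 0                                   -- max() raises on empty: excluded by Pre_

def ordenar_string_alt (lista_string : List String) : List String :=
  let grupos : PySem.Dict Int (List String) :=
    lista_string.foldl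
      (fun d palavra => d.modify (ordenarFrequenciaB palavra) [] (· ++ [palavra]))  -- setdefault(f, []).append(palavra)
      PySem.Dict.empty
  (PySem.List.sorted grupos.keys (fun f => f) true).foldl
    (fun resultado f => resultado ++ PySem.List.sorted (grupos.getD f []) (fun x => x) false)
    []

-- ===== PRECONDITION & SPEC =====
-- Pre_ excludes lists containing an empty string: there both A and B raise ValueError (max() of an empty sequence).
def Pre_ordenar_string (lista_string : List String) : Prop :=
  ∀ s ∈ lista_string, s ≠ ""
instance (lista_string : List String) : Decidable (Pre_ordenar_string lista_string) := by
  unfold Pre_ordenar_string; infer_instance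
def pvWitness_ordenar_string : List String := ["banana", "abc", "xx"]

def Spec_ordenar_string (lista_string : List String) (out : List String) : Prop := out = ordenar_string_alt lista_string
instance (lista_string : List String) (out : List String) : Decidable (Spec_ordenar_string lista_string out) := by unfold Spec_ordenar_string; infer_instance

-- ===== CLAIM (what is proved, stated in full; the proofs are below) =====
def Claim_equal_ordenar_string : Prop := ∀ (lista_string : List String), Dom_ordenar_string lista_string → Pre_ordenar_string lista_string → Spec_ordenar_string lista_string (ordenar_string lista_string)

-- ===== LEMMAS AND PROOFS =====

-- the common sort key: (-max frequency, the word itself), ordered lexicographically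
def pvKey (palavra : String) : Lex (Int × String) := toLex (-(ordenarFrequenciaB palavra), palavra)

theorem pvKey_injective : Function.Injective pvKey := by
  intro a b h
  have := congrArg (fun t => (ofLex t).2) h
  simpa [pvKey] using this

-- A's counting loop builds exactly Counter(palavra)
theorem foldA_eq_counter (cs : List Char) :
    cs.foldl
      (fun (d : PySem.Dict Char Int) letra =>
        if d.contains letra then d.modify letra 0 (· + 1) else d.insert letra 1)
      PySem.Dict.empty = PySem.Dict.counter cs := by
  rw [PySem.Dict.counter]
  refine PySem.List.foldl_congr_mem _ _ _ _ ?_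
  intro d x _
  by_cases h : d.contains x = true
  · simp [h]
  · simp only [Bool.not_eq_true] at h
    simp [h, PySem.Dict.modify, PySem.Dict.getD_of_not_contains d 0 h]

-- the two frequency helpers agree on every word
theorem freq_eq (palavra : String) : ordenarFrequenciaA palavra = ordenarFrequenciaB palavra := by
  unfold ordenarFrequenciaA ordenarFrequenciaB
  rw [foldA_eq_counter]
  have hv : (PySem.Dict.counter palavra.toList).values
      = (PySem.Set.ofList palavra.toList).map (fun ch => (PySem.List.count palavra.toList ch : Int)) := by
    simp only [PySem.Dict.values, PySem.Dict.items_counter, List.map_map]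
    rfl
  simp only [hv]

-- a tuple-key sort is a single sort by the lexicographic key
theorem sorted2_eq_sorted_lex {α κ₁ κ₂ : Type} [LinearOrder κ₁] [LinearOrder κ₂]
    (xs : List α) (k1 : α → κ₁) (k2 : α → κ₂) :
    PySem.List.sorted2 xs k1 k2 false
      = PySem.List.sorted xs (fun x => toLex (k1 x, k2 x)) false := by
  unfold PySem.List.sorted2 PySem.List.sorted
  simp only [Bool.false_eq_true, if_false]
  have hb : (fun a b => decide (k1 a < k1 b) || (!decide (k1 b < k1 a) && decide (k2 a < k2 b)))
      = (fun a b => decide (toLex (k1 a, k2 a) < toLex (k1 b, k2 b) : Prop)) := by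
    funext a b
    by_cases h1 : k1 a < k1 b
    · simp [h1, Prod.Lex.lt_iff]
    · by_cases h2 : k1 b < k1 a
      · simp [h1, h2, Prod.Lex.lt_iff, h2.ne']
      · have he : k1 a = k1 b := le_antisymm (not_lt.mp h2) (not_lt.mp h1)
        simp [Prod.Lex.lt_iff, he]
  simp only [hb]

-- A's output is sorted(xs, key=pvKey)
theorem portA_eq_sorted (lista_string : List String) :
    ordenar_string lista_string = PySem.List.sorted lista_string pvKey false := by
  unfold ordenar_string
  rw [sorted2_eq_sorted_lex]
  have : (fun (x : String) => toLex (-(ordenarFrequenciaA x), x)) = pvKey := by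
    funext x; simp [pvKey, freq_eq]
  rw [this]

-- the group-by dict: bucket f holds exactly the words of frequency f, in input order
theorem grupos_getD (lista_string : List String) (f : Int) :
    (lista_string.foldl
        (fun (d : PySem.Dict Int (List String)) palavra =>
          d.modify (ordenarFrequenciaB palavra) [] (· ++ [palavra]))
        PySem.Dict.empty).getD f []
      = lista_string.filter (fun p => ordenarFrequenciaB p == f) := by
  have h := PySem.Dict.getD_foldl_modify_append
      (lista_string.map (fun p => (ordenarFrequenciaB p, p))) (PySem.Dict.empty) f
  rw [List.foldl_map] at h
  simp only [List.filter_map, List.map_map, Function.comp_def] at h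
  simpa using h

-- its key list: the distinct frequencies in first-appearance order
theorem grupos_keys (lista_string : List String) :
    (lista_string.foldl
        (fun (d : PySem.Dict Int (List String)) palavra =>
          d.modify (ordenarFrequenciaB palavra) [] (· ++ [palavra]))
        PySem.Dict.empty).keys
      = PySem.Set.ofList (lista_string.map ordenarFrequenciaB) := by
  have h := PySem.Dict.keys_foldl_modify_key lista_string ordenarFrequenciaB ([] : List String)
      (fun _ palavra => (· ++ [palavra])) PySem.Dict.empty
  simpa [PySem.Dict.keys_empty, PySem.Set.update, PySem.Set.ofList] using h

-- concatenating the filtered buckets, over any duplicate-free key list covering every frequency,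
-- is a permutation of the input
theorem flatMap_filter_perm (ks : List Int) :
    ∀ (l : List String), ks.Nodup → (∀ p ∈ l, ordenarFrequenciaB p ∈ ks) →
      (ks.flatMap (fun f => l.filter (fun p => ordenarFrequenciaB p == f))).Perm l := by
  induction ks with
  | nil =>
      intro l _ hcov
      cases l with
      | nil => simp
      | cons p t => exact absurd (hcov p (by simp)) (by simp)
  | cons f ks' ih =>
      intro l hnd hcov
      rw [List.flatMap_cons]
      have hnd' := List.nodup_cons.mp hnd
      have hswap : ∀ g ∈ ks',
          l.filter (fun p => ordenarFrequenciaB p == g)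
            = (l.filter (fun p => !(ordenarFrequenciaB p == f))).filter
                (fun p => ordenarFrequenciaB p == g) := by
        intro g hg
        have hgf : g ≠ f := by rintro rfl; exact hnd'.1 hg
        rw [List.filter_filter]
        refine (List.filter_congr ?_).symm
        intro x _
        by_cases hx : ordenarFrequenciaB x = g
        · simp [hx, hgf]
        · simp [hx]
      rw [List.flatMap_congr hswap]
      have hcov' : ∀ p ∈ l.filter (fun p => !(ordenarFrequenciaB p == f)),
          ordenarFrequenciaB p ∈ ks' := by
        intro p hp
        obtain ⟨hpl, hpf⟩ := List.mem_filter.mp hp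
        have hm := hcov p hpl
        simp only [List.mem_cons] at hm
        rcases hm with h | h
        · simp [h] at hpf
        · exact h
      have hperm' := ih (l.filter (fun p => !(ordenarFrequenciaB p == f))) hnd'.2 hcov'
      exact (List.Perm.append_left _ hperm').trans (List.filter_append_perm _ l)

-- B's output, written as a flat map over the sorted distinct frequencies
theorem portB_eq_flatMap (lista_string : List String) :
    ordenar_string_alt lista_string
      = (PySem.List.sorted (PySem.Set.ofList (lista_string.map ordenarFrequenciaB))
            (fun f => f) true).flatMap
          (fun f => PySem.List.sorted
              (lista_string.filter (fun p => ordenarFrequenciaB p == f)) (fun x => x) false) := by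
  unfold ordenar_string_alt
  simp only [grupos_keys, grupos_getD, PySem.List.foldl_append_eq_flatMap, List.nil_append]

-- B's output is a permutation of the input
theorem portB_perm (lista_string : List String) :
    (ordenar_string_alt lista_string).Perm lista_string := by
  rw [portB_eq_flatMap]
  have hkeys := PySem.List.sorted_perm
      (PySem.Set.ofList (lista_string.map ordenarFrequenciaB)) (fun f => f) true
  have hstep1 : ((PySem.List.sorted (PySem.Set.ofList (lista_string.map ordenarFrequenciaB))
        (fun f => f) true).flatMap
          (fun f => PySem.List.sorted
              (lista_string.filter (fun p => ordenarFrequenciaB p == f)) (fun x => x) false)).Perm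
      ((PySem.List.sorted (PySem.Set.ofList (lista_string.map ordenarFrequenciaB))
        (fun f => f) true).flatMap
          (fun f => lista_string.filter (fun p => ordenarFrequenciaB p == f))) :=
    List.Perm.flatMap (List.Perm.refl _)
      (fun f _ => PySem.List.sorted_perm _ _ _)
  refine hstep1.trans (flatMap_filter_perm _ lista_string ?_ ?_)
  · exact hkeys.nodup_iff.mpr (PySem.Set.nodup_ofList _)
  · intro p hp
    rw [hkeys.mem_iff, PySem.Set.mem_ofList]
    exact List.mem_map_of_mem hp

-- B's output is pairwise nondecreasing under the key
theorem portB_pairwise (lista_string : List String) :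
    (ordenar_string_alt lista_string).Pairwise (fun a b => pvKey a ≤ pvKey b) := by
  rw [portB_eq_flatMap, List.flatMap_def, List.pairwise_flatten]
  constructor
  · -- inside a bucket: same frequency, lexicographically sorted
    intro l hl
    rw [List.mem_map] at hl
    obtain ⟨f, _, rfl⟩ := hl
    have hsorted := PySem.List.sorted_pairwise
        (lista_string.filter (fun p => ordenarFrequenciaB p == f)) (fun x => x)
    refine hsorted.imp_of_mem ?_
    intro a b ha hb hab
    have hfa : ordenarFrequenciaB a = f := by
      have := List.mem_filter.mp ((PySem.List.mem_sorted _ _ _ _).mp ha)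
      simpa using this.2
    have hfb : ordenarFrequenciaB b = f := by
      have := List.mem_filter.mp ((PySem.List.mem_sorted _ _ _ _).mp hb)
      simpa using this.2
    rw [pvKey, pvKey, Prod.Lex.le_iff]
    exact Or.inr ⟨by simp [hfa, hfb], hab⟩
  · -- across buckets: strictly decreasing frequency
    rw [List.pairwise_map]
    have hdesc := PySem.List.sorted_pairwise_rev
        (PySem.Set.ofList (lista_string.map ordenarFrequenciaB)) (fun f => f)
    have hnd : (PySem.List.sorted (PySem.Set.ofList (lista_string.map ordenarFrequenciaB))
        (fun f => f) true).Nodup :=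
      (PySem.List.sorted_perm _ _ _).nodup_iff.mpr (PySem.Set.nodup_ofList _)
    refine (hdesc.and hnd).imp ?_
    rintro f1 f2 ⟨hle, hne⟩ x hx y hy
    have hlt : f2 < f1 := lt_of_le_of_ne hle (Ne.symm hne)
    have hfx : ordenarFrequenciaB x = f1 := by
      have := List.mem_filter.mp ((PySem.List.mem_sorted _ _ _ _).mp hx)
      simpa using this.2
    have hfy : ordenarFrequenciaB y = f2 := by
      have := List.mem_filter.mp ((PySem.List.mem_sorted _ _ _ _).mp hy)
      simpa using this.2
    rw [pvKey, pvKey, Prod.Lex.le_iff]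
    exact Or.inl (by simp [hfx, hfy]; omega)

theorem ordenar_eq (lista_string : List String) :
    ordenar_string lista_string = ordenar_string_alt lista_string := by
  refine PySem.List.eq_of_perm_of_pairwise_le_of_injective pvKey pvKey_injective ?_ ?_ ?_
  · exact ((portA_eq_sorted lista_string ▸
      PySem.List.sorted_perm lista_string pvKey false).trans (portB_perm lista_string).symm)
  · rw [portA_eq_sorted]; exact PySem.List.sorted_pairwise lista_string pvKey
  · exact portB_pairwise lista_string

-- ===== VERDICT (by name: the statement is the Claim_ definition above) =====
theorem ordenar_string_spec : Claim_equal_ordenar_string := by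
  intro lista_string _ _
  unfold Spec_ordenar_string
  exact ordenar_eq lista_string
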